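-- pv_equiv track=rewrite | github.com/aparjun/python | Train Schedule.py | get_total_fare
-- ===== SOURCE A (Python) =====
-- train_list=[
-- {"train_no":16453,"name":"Prasanti Express","from":"SBC","to":"BBS","days_of_run":['Mo','We','Th'],"sleeper_fare":600,"ac_fare": 987},
-- {"train_no":25627,"name":"Karnataka Express","from":"SBC","to":"DEC","days_of_run":['Su','Tu'],"sleeper_fare":1600,"ac_fare": 2500},
-- {"train_no":22642,"name":"Trivandrum SF Express","from":"VSKP","to":"TVM","days_of_run":['Mo','Tu','We','Th','Fr','Sa'],"sleeper_fare":800,"ac_fare": 1256},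
-- {"train_no":22905,"name":"Okha Howrah Express","from":"ST","to":"KOAA","days_of_run":['We','Sa'],"sleeper_fare":987,"ac_fare": 2879}]
--
-- def get_total_fare(train_no,passenger_dict):
--
--     sleeper_cost = 0
--     ac_cost = 0
--     for items in train_list:
--         if  items["train_no"] == train_no:
--             ac_cost = items["ac_fare"] * passenger_dict["ac"]
--             sleeper_cost = items['sleeper_fare'] * passenger_dict["sleeper"]
--     return ac_cost + sleeper_cost
-- ===== SOURCE B (Python) =====
-- train_list=[
-- {"train_no":16453,"name":"Prasanti Express","from":"SBC","to":"BBS","days_of_run":['Mo','We','Th'],"sleeper_fare":600,"ac_fare": 987},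
-- {"train_no":25627,"name":"Karnataka Express","from":"SBC","to":"DEC","days_of_run":['Su','Tu'],"sleeper_fare":1600,"ac_fare": 2500},
-- {"train_no":22642,"name":"Trivandrum SF Express","from":"VSKP","to":"TVM","days_of_run":['Mo','Tu','We','Th','Fr','Sa'],"sleeper_fare":800,"ac_fare": 1256},
-- {"train_no":22905,"name":"Okha Howrah Express","from":"ST","to":"KOAA","days_of_run":['We','Sa'],"sleeper_fare":987,"ac_fare": 2879}]
--
-- def get_total_fare(train_no, passenger_dict):
--     # Loop inversion: iterate the passenger classes that were booked, and for each
--     # class sum the fares of the matching trains (train numbers are unique, so the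
--     # inner sum is that train's fare, or 0 when no train matches).
--     return sum(
--         count * sum(t[cls + "_fare"] for t in train_list if t["train_no"] == train_no)
--         for cls, count in passenger_dict.items()
--         if cls in ("ac", "sleeper"))
-- ===== Notes on version B (the rewrite author's own statement) =====
-- stated objective: alternative
-- what changed: Inverted the loops: instead of A's scan over train_list that overwrites two accumulators and then indexes passenger_dict, B iterates the passenger dict's (class, count) items and multiplies each count by the sum of matching fares over train_list (equal to that train's fare since train numbers are unique, 0 when absent).
import Mathlib
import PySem

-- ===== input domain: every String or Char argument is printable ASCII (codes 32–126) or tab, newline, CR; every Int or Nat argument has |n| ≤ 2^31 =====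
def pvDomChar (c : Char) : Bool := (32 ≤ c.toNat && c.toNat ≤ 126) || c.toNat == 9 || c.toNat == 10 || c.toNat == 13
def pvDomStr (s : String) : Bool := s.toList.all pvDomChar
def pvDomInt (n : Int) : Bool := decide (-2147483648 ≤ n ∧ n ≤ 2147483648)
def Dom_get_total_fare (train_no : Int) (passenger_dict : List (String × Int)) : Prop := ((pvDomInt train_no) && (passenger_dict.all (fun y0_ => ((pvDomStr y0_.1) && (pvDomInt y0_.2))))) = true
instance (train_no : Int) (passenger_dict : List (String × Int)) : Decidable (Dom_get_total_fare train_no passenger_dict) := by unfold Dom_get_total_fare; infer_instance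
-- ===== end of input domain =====

-- B inverts the loops: it iterates the passenger dict's (class, count) items and,
-- per class, sums the matching fares over train_list, instead of A's train scan
-- with overwritten accumulators (alternative decomposition, same cost).
-- ===== PORT A =====
-- train_list, keeping only the fields A reads: (train_no, ac_fare, sleeper_fare)
def trainList : List (Int × Int × Int) :=
  [(16453, 987, 600), (25627, 2500, 1600), (22642, 1256, 800), (22905, 2879, 987)]

def get_total_fare (train_no : Int) (passenger_dict : List (String × Int)) : Int :=
  -- for items in train_list: on a match overwrite (ac_cost, sleeper_cost);
  -- passenger_dict["ac"]/["sleeper"] as getD 0, exact under Pre_ (keys present on a match)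
  let st := trainList.foldl (fun (st : Int × Int) items =>
    if items.1 = train_no then
      (items.2.1 * (PySem.Dict.mk passenger_dict).getD "ac" 0,
       items.2.2 * (PySem.Dict.mk passenger_dict).getD "sleeper" 0)
    else st) (0, 0)
  st.1 + st.2

-- ===== PORT B =====
-- sum(t[cls + "_fare"] for t in train_list if t["train_no"] == train_no);
-- cls is "ac" or "sleeper", so t[cls+"_fare"] selects the ac resp. sleeper field
def classFareSum (train_no : Int) (cls : String) : Int :=
  trainList.foldl (fun s t =>
    if t.1 = train_no then s + (if cls == "ac" then t.2.1 else t.2.2) else s) 0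

def get_total_fare_alt (train_no : Int) (passenger_dict : List (String × Int)) : Int :=
  -- sum(count * classFareSum for cls, count in passenger_dict.items() if cls in ("ac","sleeper"))
  passenger_dict.foldl (fun total kv =>
    if kv.1 == "ac" || kv.1 == "sleeper" then total + kv.2 * classFareSum train_no kv.1
    else total) 0

-- ===== PRECONDITION & SPEC =====
-- Pre_ excludes (a) inputs where a listed train matches but passenger_dict lacks "ac" or
-- "sleeper", on which A raises KeyError, and (b) association lists with duplicate keys,
-- which do not arise from any Python dict.
def Pre_get_total_fare (train_no : Int) (passenger_dict : List (String × Int)) : Prop :=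
  (passenger_dict.map Prod.fst).Nodup ∧
  (train_no ∈ [16453, 25627, 22642, (22905 : Int)] →
    ("ac" ∈ passenger_dict.map Prod.fst ∧ "sleeper" ∈ passenger_dict.map Prod.fst))
instance (train_no : Int) (passenger_dict : List (String × Int)) : Decidable (Pre_get_total_fare train_no passenger_dict) := by unfold Pre_get_total_fare; infer_instance
def pvWitness_get_total_fare : Int × (List (String × Int)) := (16453, [("ac", 2), ("sleeper", 3)])
def Spec_get_total_fare (train_no : Int) (passenger_dict : List (String × Int)) (out : Int) : Prop := out = get_total_fare_alt train_no passenger_dict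
instance (train_no : Int) (passenger_dict : List (String × Int)) (out : Int) : Decidable (Spec_get_total_fare train_no passenger_dict out) := by unfold Spec_get_total_fare; infer_instance

-- ===== CLAIM (what is proved, stated in full; the proofs are below) =====
def Claim_equal_get_total_fare : Prop := ∀ (train_no : Int) (passenger_dict : List (String × Int)), Dom_get_total_fare train_no passenger_dict → Pre_get_total_fare train_no passenger_dict → Spec_get_total_fare train_no passenger_dict (get_total_fare train_no passenger_dict)

-- ===== LEMMAS AND PROOFS =====

-- B's loop over a nodup-key association list collects exactly getD "ac" * g "ac" + getD "sleeper" * g "sleeper"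
theorem foldl_classes (g : String → Int) (l : List (String × Int))
    (hnd : (l.map Prod.fst).Nodup) (init : Int) :
    l.foldl (fun total kv =>
      if kv.1 == "ac" || kv.1 == "sleeper" then total + kv.2 * g kv.1 else total) init
    = init + ((PySem.Dict.mk l).getD "ac" 0) * g "ac"
           + ((PySem.Dict.mk l).getD "sleeper" 0) * g "sleeper" := by
  induction l generalizing init with
  | nil => simp [PySem.Dict.getD, PySem.Dict.get?]
  | cons kv rest ih =>
    obtain ⟨k, v⟩ := kv
    simp only [List.map_cons, List.nodup_cons] at hnd
    obtain ⟨hk, hndr⟩ := hnd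
    have hgd : ∀ c : String, (PySem.Dict.mk ((k, v) :: rest)).getD c 0
        = if k = c then v else (PySem.Dict.mk rest).getD c 0 := by
      intro c
      simp [PySem.Dict.getD_eq_get?_getD, PySem.Dict.get?_mk_cons]
      by_cases h : k = c <;> simp [h]
    have hnone : ∀ c : String, c = k →
        (PySem.Dict.mk rest).getD c 0 = 0 := by
      intro c hc
      have : (PySem.Dict.mk rest).get? c = none := by
        rw [PySem.Dict.get?_eq_none_iff_not_mem_keys]
        simpa [PySem.Dict.keys, hc] using hk
      simp [PySem.Dict.getD_eq_get?_getD, this]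
    rw [List.foldl_cons, ih hndr, hgd, hgd]
    by_cases h1 : k = "ac"
    · subst h1
      rw [hnone "ac" rfl]
      simp
    · by_cases h2 : k = "sleeper"
      · subst h2
        rw [hnone "sleeper" rfl]
        simp
        ring
      · simp [h1, h2]

-- ===== VERDICT (by name: the statement is the Claim_ definition above) =====
theorem get_total_fare_spec : Claim_equal_get_total_fare := by
  intro tn pd _ hpre
  obtain ⟨hnd, hkeys⟩ := hpre
  unfold Spec_get_total_fare get_total_fare get_total_fare_alt
  rw [foldl_classes (classFareSum tn) pd hnd]
  generalize (PySem.Dict.mk pd).getD "ac" 0 = ga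
  generalize (PySem.Dict.mk pd).getD "sleeper" 0 = gs
  by_cases h1 : (16453 : Int) = tn
  · subst h1; simp [trainList, classFareSum, List.foldl]; ring
  by_cases h2 : (25627 : Int) = tn
  · subst h2; simp [trainList, classFareSum, List.foldl]; ring
  by_cases h3 : (22642 : Int) = tn
  · subst h3; simp [trainList, classFareSum, List.foldl]; ring
  by_cases h4 : (22905 : Int) = tn
  · subst h4; simp [trainList, classFareSum, List.foldl]; ring
  simp [trainList, classFareSum, List.foldl, h1, h2, h3, h4]
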